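-- pv_equiv track=rewrite | github.com/reviewboard/reviewboard | reviewboard/diffviewer/processors.py | post_process_filtered_equals
-- ===== SOURCE A (Python) =====
-- def post_process_filtered_equals(opcodes):
--     """Post-processes filtered-equal and equal chunks from interdiffs.
--
--     Any filtered-out "filtered-equal" chunks will get turned back into "equal"
--     chunks and merged into any prior equal chunks. Likewise, simple "equal"
--     chunks will also get merged.
--
--     "equal" chunks that have any indentation information will remain
--     their own chunks, with nothing merged in.
--     """
--     cur_chunk = None
--
--     for tag, i1, i2, j1, j2, meta in opcodes:
--         if ((tag == 'equal' and not meta.get('indentation_changes')) or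
--             tag == 'filtered-equal'):
--             # We either have a plain equal chunk without any indentation
--             # changes, or a filtered-equal chunk. In these cases, we can
--             # safely merge the chunks together and transform them into
--             # an "equal" chunk.
--             if cur_chunk:
--                 i1 = cur_chunk[1]
--                 j1 = cur_chunk[3]
--                 meta = cur_chunk[5]
--
--             cur_chunk = ('equal', i1, i2, j1, j2, meta)
--         else:
--             # This is some sort of changed chunk (insert, delete, replace,
--             # or equal with indentation changes). Yield the previous chunk
--             # we were working with, if any, and then yield the current chunk.
--             if cur_chunk:
--                 yield cur_chunk
--                 cur_chunk = None
--
--             yield tag, i1, i2, j1, j2, meta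
--
--     if cur_chunk:
--         yield cur_chunk
-- ===== SOURCE B (Python) =====
-- def post_process_filtered_equals(opcodes):
--     """Group-then-reduce reformulation: detect each maximal run of mergeable
--     chunks with a two-pointer scan and emit one merged 'equal' chunk per run."""
--     ops = list(opcodes)
--
--     def mergeable(op):
--         tag, meta = op[0], op[5]
--         return tag == 'filtered-equal' or (tag == 'equal' and
--                                            not meta.get('indentation_changes'))
--
--     n = len(ops)
--     i = 0
--     while i < n:
--         if mergeable(ops[i]):
--             j = i
--             while j + 1 < n and mergeable(ops[j + 1]):
--                 j += 1
--             yield ('equal', ops[i][1], ops[j][2], ops[i][3], ops[j][4],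
--                    ops[i][5])
--             i = j + 1
--         else:
--             yield ops[i]
--             i += 1
-- ===== Notes on version B (the rewrite author's own statement) =====
-- stated objective: alternative
-- what changed: Replaces A's running-accumulator state machine (a pending cur_chunk merged into and flushed on non-mergeable chunks) with a group-then-reduce two-pointer scan: each maximal run of mergeable chunks is located up front and reduced to one merged chunk taken from its first and last elements.
import Mathlib
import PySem

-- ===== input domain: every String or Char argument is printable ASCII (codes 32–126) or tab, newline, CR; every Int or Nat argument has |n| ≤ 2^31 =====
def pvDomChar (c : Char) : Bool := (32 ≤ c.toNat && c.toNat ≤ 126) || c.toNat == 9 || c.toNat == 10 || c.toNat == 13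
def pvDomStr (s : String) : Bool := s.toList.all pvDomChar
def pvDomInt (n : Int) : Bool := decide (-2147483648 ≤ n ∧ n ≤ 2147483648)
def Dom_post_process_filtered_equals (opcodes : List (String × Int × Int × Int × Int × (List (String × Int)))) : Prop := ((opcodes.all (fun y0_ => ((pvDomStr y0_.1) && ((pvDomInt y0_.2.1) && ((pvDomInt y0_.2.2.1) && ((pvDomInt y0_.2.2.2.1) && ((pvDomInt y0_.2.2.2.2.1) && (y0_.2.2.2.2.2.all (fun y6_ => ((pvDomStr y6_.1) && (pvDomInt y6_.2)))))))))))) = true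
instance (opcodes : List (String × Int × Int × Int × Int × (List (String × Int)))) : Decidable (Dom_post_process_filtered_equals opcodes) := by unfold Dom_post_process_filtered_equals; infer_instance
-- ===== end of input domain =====

-- B replaces A's running-accumulator state machine with a group-then-reduce two-pointer
-- scan over maximal runs of mergeable chunks (objective: alternative; same O(n) cost).

-- truthiness of meta.get('indentation_changes'): None and 0 are falsy
def pvIndent (m : List (String × Int)) : Bool :=
  match m.lookup "indentation_changes" with  -- dict.get: first match in the assoc list
  | some v => v != 0
  | none => false

-- ===== PORT A =====
-- A's merge condition, in A's order
def pvMergeA (op : String × Int × Int × Int × Int × (List (String × Int))) : Bool :=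
  (op.1 == "equal" && !(pvIndent op.2.2.2.2.2)) || op.1 == "filtered-equal"

-- one iteration of A's for-loop over the state (yielded chunks so far, cur_chunk)
def pvStepA (s : List (String × Int × Int × Int × Int × (List (String × Int))) ×
                 Option (String × Int × Int × Int × Int × (List (String × Int))))
    (op : String × Int × Int × Int × Int × (List (String × Int))) :
    List (String × Int × Int × Int × Int × (List (String × Int))) ×
    Option (String × Int × Int × Int × Int × (List (String × Int))) :=
  if pvMergeA op then
    match s.2 with
    | some c => (s.1, some ("equal", c.2.1, op.2.2.1, c.2.2.2.1, op.2.2.2.2.1, c.2.2.2.2.2))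
    | none => (s.1, some ("equal", op.2.1, op.2.2.1, op.2.2.2.1, op.2.2.2.2.1, op.2.2.2.2.2))
  else
    match s.2 with
    | some c => (s.1 ++ [c, op], none)
    | none => (s.1 ++ [op], none)

def post_process_filtered_equals (opcodes : List (String × Int × Int × Int × Int × (List (String × Int)))) : List (String × Int × Int × Int × Int × (List (String × Int))) :=
  match opcodes.foldl pvStepA ([], none) with
  | (acc, some c) => acc ++ [c]
  | (acc, none) => acc

-- ===== PORT B =====
-- B's mergeable predicate, in B's order
def pvMergeable (op : String × Int × Int × Int × Int × (List (String × Int))) : Bool :=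
  op.1 == "filtered-equal" || (op.1 == "equal" && !(pvIndent op.2.2.2.2.2))

def post_process_filtered_equals_alt : List (String × Int × Int × Int × Int × (List (String × Int))) → List (String × Int × Int × Int × Int × (List (String × Int)))
  | [] => []
  | op :: rest =>
    if pvMergeable op then
      -- the inner while-loop: extend j to the end of the run; ops[j] is its last element
      let lst := (rest.takeWhile pvMergeable).getLastD op
      ("equal", op.2.1, lst.2.2.1, op.2.2.2.1, lst.2.2.2.2.1, op.2.2.2.2.2)
        :: post_process_filtered_equals_alt (rest.dropWhile pvMergeable)
    else
      op :: post_process_filtered_equals_alt rest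
termination_by l => l.length
decreasing_by
  · exact Nat.lt_succ_of_le (List.length_dropWhile_le _ _)
  · simp

-- ===== PRECONDITION & SPEC =====
def Spec_post_process_filtered_equals (opcodes : List (String × Int × Int × Int × Int × (List (String × Int)))) (out : List (String × Int × Int × Int × Int × (List (String × Int)))) : Prop := out = post_process_filtered_equals_alt opcodes
-- DecidableEq on the chunk type, assembled explicitly (automatic synthesis hits the
-- default search limit on the 6-component product)
def pvDecEqChunk : DecidableEq (String × Int × Int × Int × Int × List (String × Int)) :=
  @instDecidableEqProd _ _ _
    (@instDecidableEqProd _ _ _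
      (@instDecidableEqProd _ _ _
        (@instDecidableEqProd _ _ _
          (@instDecidableEqProd _ _ _ _))))
instance (opcodes : List (String × Int × Int × Int × Int × (List (String × Int)))) (out : List (String × Int × Int × Int × Int × (List (String × Int)))) : Decidable (Spec_post_process_filtered_equals opcodes out) := by
  unfold Spec_post_process_filtered_equals
  exact @instDecidableEqList _ pvDecEqChunk out (post_process_filtered_equals_alt opcodes)

-- ===== CLAIM (what is proved, stated in full; the proofs are below) =====
def Claim_equal_post_process_filtered_equals : Prop := ∀ (opcodes : List (String × Int × Int × Int × Int × (List (String × Int)))), Dom_post_process_filtered_equals opcodes → Spec_post_process_filtered_equals opcodes (post_process_filtered_equals opcodes)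

-- ===== LEMMAS AND PROOFS =====

-- A's merge of the pending chunk with the next mergeable chunk
def pvMergeOne (c op : String × Int × Int × Int × Int × (List (String × Int))) :
    String × Int × Int × Int × Int × (List (String × Int)) :=
  ("equal", c.2.1, op.2.2.1, c.2.2.2.1, op.2.2.2.2.1, c.2.2.2.2.2)

-- final 'if cur_chunk: yield cur_chunk'
def pvFinish (s : List (String × Int × Int × Int × Int × (List (String × Int))) ×
                  Option (String × Int × Int × Int × Int × (List (String × Int)))) :
    List (String × Int × Int × Int × Int × (List (String × Int))) :=
  match s.2 with
  | some c => s.1 ++ [c]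
  | none => s.1

lemma pvMergeA_eq (op : String × Int × Int × Int × Int × (List (String × Int))) :
    pvMergeA op = pvMergeable op := by
  simp [pvMergeA, pvMergeable, Bool.or_comm]

lemma pvPortA_eq (opcodes : List (String × Int × Int × Int × Int × (List (String × Int)))) :
    post_process_filtered_equals opcodes = pvFinish (opcodes.foldl pvStepA ([], none)) := by
  unfold post_process_filtered_equals pvFinish
  rcases opcodes.foldl pvStepA ([], none) with ⟨acc, _ | c⟩ <;> rfl

lemma pvStepA_fst (s : List (String × Int × Int × Int × Int × (List (String × Int))) ×
      Option (String × Int × Int × Int × Int × (List (String × Int))))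
    (op : String × Int × Int × Int × Int × (List (String × Int))) :
    (pvStepA s op).1 = s.1 ++ (pvStepA ([], s.2) op).1 := by
  by_cases h : pvMergeA op <;> rcases s with ⟨acc, _ | c⟩ <;> simp [pvStepA, h]

lemma pvStepA_snd (s : List (String × Int × Int × Int × Int × (List (String × Int))) ×
      Option (String × Int × Int × Int × Int × (List (String × Int))))
    (op : String × Int × Int × Int × Int × (List (String × Int))) :
    (pvStepA s op).2 = (pvStepA ([], s.2) op).2 := by
  by_cases h : pvMergeA op <;> rcases s with ⟨acc, _ | c⟩ <;> simp [pvStepA, h]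

lemma pvFinish_foldl_acc (l : List (String × Int × Int × Int × Int × (List (String × Int))))
    (s : List (String × Int × Int × Int × Int × (List (String × Int))) ×
      Option (String × Int × Int × Int × Int × (List (String × Int)))) :
    pvFinish (l.foldl pvStepA s) = s.1 ++ pvFinish (l.foldl pvStepA ([], s.2)) := by
  induction l generalizing s with
  | nil => rcases s with ⟨acc, _ | c⟩ <;> simp [pvFinish]
  | cons op l ih =>
    simp only [List.foldl_cons]
    rw [ih (pvStepA s op), ih (pvStepA ([], s.2) op), pvStepA_fst s op, pvStepA_snd s op]
    simp [List.append_assoc]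

lemma pvFoldlMerge (run : List (String × Int × Int × Int × Int × (List (String × Int))))
    (i1 i2 j1 j2 : Int) (m : List (String × Int))
    (d : String × Int × Int × Int × Int × (List (String × Int)))
    (h2 : d.2.2.1 = i2) (h4 : d.2.2.2.2.1 = j2) :
    run.foldl pvMergeOne ("equal", i1, i2, j1, j2, m) =
      ("equal", i1, (run.getLastD d).2.2.1, j1, (run.getLastD d).2.2.2.2.1, m) := by
  induction run generalizing i2 j2 d with
  | nil => simp [List.getLastD, h2, h4]
  | cons x xs ih =>
    simp only [List.foldl_cons, List.getLastD_cons]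
    exact ih x.2.2.1 x.2.2.2.2.1 x rfl rfl

lemma pvMain (l : List (String × Int × Int × Int × Int × (List (String × Int)))) :
    pvFinish (l.foldl pvStepA ([], none)) = post_process_filtered_equals_alt l ∧
    (∀ c, pvFinish (l.foldl pvStepA ([], some c)) =
      (l.takeWhile pvMergeable).foldl pvMergeOne c
        :: post_process_filtered_equals_alt (l.dropWhile pvMergeable)) := by
  induction l with
  | nil =>
    refine ⟨?_, fun c => ?_⟩ <;> rw [post_process_filtered_equals_alt.eq_def] <;> rfl
  | cons op l ih =>
    obtain ⟨ih1, ih2⟩ := ih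
    by_cases h : pvMergeable op
    · constructor
      · rw [List.foldl_cons]
        show pvFinish (l.foldl pvStepA (pvStepA ([], none) op)) = _
        rw [show pvStepA ([], none) op =
            ([], some ("equal", op.2.1, op.2.2.1, op.2.2.2.1, op.2.2.2.2.1, op.2.2.2.2.2)) by
          simp [pvStepA, pvMergeA_eq, h]]
        rw [ih2]
        rw [pvFoldlMerge (l.takeWhile pvMergeable) op.2.1 op.2.2.1 op.2.2.2.1 op.2.2.2.2.1
          op.2.2.2.2.2 op rfl rfl]
        simp [post_process_filtered_equals_alt, h]
      · intro c
        rw [List.foldl_cons]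
        show pvFinish (l.foldl pvStepA (pvStepA ([], some c) op)) = _
        rw [show pvStepA ([], some c) op = ([], some (pvMergeOne c op)) by
          simp [pvStepA, pvMergeA_eq, h, pvMergeOne]]
        rw [ih2]
        simp [h]
    · constructor
      · rw [List.foldl_cons]
        show pvFinish (l.foldl pvStepA (pvStepA ([], none) op)) = _
        rw [show pvStepA ([], none) op = ([op], none) by
          simp [pvStepA, pvMergeA_eq, h]]
        rw [pvFinish_foldl_acc _ _, ih1]
        simp [post_process_filtered_equals_alt, h]
      · intro c
        rw [List.foldl_cons]
        show pvFinish (l.foldl pvStepA (pvStepA ([], some c) op)) = _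
        rw [show pvStepA ([], some c) op = ([c, op], none) by
          simp [pvStepA, pvMergeA_eq, h]]
        rw [pvFinish_foldl_acc _ _, ih1]
        simp [h,
          post_process_filtered_equals_alt]

-- ===== VERDICT (by name: the statement is the Claim_ definition above) =====
theorem post_process_filtered_equals_spec : Claim_equal_post_process_filtered_equals := by
  intro opcodes _
  unfold Spec_post_process_filtered_equals
  rw [pvPortA_eq, (pvMain opcodes).1]
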